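-- pv_equiv track=rewrite | github.com/aaman007/py-dumps | ctci/bit_manipulation/next_number.py | get_prev
-- ===== SOURCE A (Python) =====
-- def get_prev(number):
--     c = number
--     c0, c1 = 0, 0
--
--     while c & 1:
--         c1 += 1
--         c >>= 1
--
--     if not c:
--         return -1
--
--     while c and not (c & 1):
--         c0 += 1
--         c >>= 1
--
--     p = c0 + c1  # position of rightmost non-trailing zero
--
--     number &= ((~0) << (p + 1))  # clears from bit p onwards
--     mask = (1 << (c1 + 1)) - 1  # Sequence of (cl+l) ones
--     number |= mask << (c0 - 1)
--
--     return number
-- ===== SOURCE B (Python) =====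
-- def get_prev(number):
--     # Previous number with the same number of set bits, via O(1) bit tricks
--     # instead of A's bit-counting loops.
--     c = number & (number + 1)          # clear the trailing run of ones
--     if c == 0:
--         return -1                      # 0 or 0b11..1: no previous number
--     low = c & -c                       # lowest set bit of c  (== 1 << p)
--     z = (~number) & (number + 1)       # lowest zero bit of number (== 1 << c1)
--     return c - low // (2 * z)
-- ===== Notes on version B (the rewrite author's own statement) =====
-- stated objective: alternative
-- what changed: A counts trailing ones and zeros with two shift loops and rebuilds the result with masks; B is loop-free: it isolates the trailing-ones run, the lowest set bit and the lowest zero bit with three classic bit tricks (n&(n+1), c&-c, ~n&(n+1)) and obtains the result by one subtraction. Pre_ excludes only number = -1, where A's first while loop never terminates; B returns -1 there.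
-- outside the precondition, e.g. on get_prev(-1): A does not finish within the time limit, B returns -1
import Mathlib
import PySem

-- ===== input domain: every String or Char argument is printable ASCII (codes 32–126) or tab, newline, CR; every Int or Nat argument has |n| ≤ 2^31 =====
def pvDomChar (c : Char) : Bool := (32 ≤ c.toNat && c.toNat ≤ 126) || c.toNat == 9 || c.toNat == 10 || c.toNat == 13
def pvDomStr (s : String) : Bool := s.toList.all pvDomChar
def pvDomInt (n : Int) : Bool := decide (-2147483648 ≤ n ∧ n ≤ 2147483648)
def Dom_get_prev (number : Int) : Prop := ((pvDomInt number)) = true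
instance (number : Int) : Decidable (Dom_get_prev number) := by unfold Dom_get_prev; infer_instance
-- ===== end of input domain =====

-- B replaces A's two bit-counting shift loops by three loop-free bit tricks; the
-- equivalence claim is over the stated Pre_ (number ≠ -1, where A's first loop spins).

-- ===== PORT A =====
-- `while c & 1: c1 += 1; c >>= 1` — fuel is a totality guard only (for number = -1,
-- excluded by Pre_, Python's loop never terminates; inside Dom ∩ Pre_ at most 33
-- iterations happen and fuel 64 is never exhausted).
def getPrevLoop1 : Nat → Int → Nat → Int × Nat
  | 0, c, c1 => (c, c1)
  | fuel + 1, c, c1 =>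
      if PySem.Int.band c 1 ≠ 0 then getPrevLoop1 fuel (c >>> (1 : Nat)) (c1 + 1)
      else (c, c1)

-- `while c and not (c & 1): c0 += 1; c >>= 1` — same fuel remark.
def getPrevLoop2 : Nat → Int → Nat → Int × Nat
  | 0, c, c0 => (c, c0)
  | fuel + 1, c, c0 =>
      if c ≠ 0 ∧ PySem.Int.band c 1 = 0 then getPrevLoop2 fuel (c >>> (1 : Nat)) (c0 + 1)
      else (c, c0)

def get_prev (number : Int) : Int :=
  let r1 := getPrevLoop1 64 number 0
  let c := r1.1
  let c1 := r1.2
  if c = 0 then -1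
  else
    let r2 := getPrevLoop2 64 c 0
    let c0 := r2.2
    let p := c0 + c1                                    -- position of rightmost non-trailing zero
    let number' := PySem.Int.band number ((Int.not 0) <<< (p + 1))   -- number &= (~0) << (p+1)
    let mask := ((1 : Int) <<< (c1 + 1)) - 1            -- (1 << (c1+1)) - 1
    PySem.Int.bor number' (mask <<< (c0 - 1))           -- number |= mask << (c0-1); c0 ≥ 1 on every reached path

-- ===== PORT B =====
def get_prev_alt (number : Int) : Int :=
  let c := PySem.Int.band number (number + 1)           -- clear the trailing run of ones
  if c = 0 then -1
  else
    let low := PySem.Int.band c (-c)                    -- lowest set bit of c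
    let z := PySem.Int.band (Int.not number) (number + 1)  -- lowest zero bit of number
    c - PySem.Int.floordiv low (2 * z)

-- ===== PRECONDITION & SPEC =====
-- Pre_ excludes only number = -1: there A's first while loop never terminates
-- (infinite run of trailing ones); B returns -1 on it.
def Pre_get_prev (number : Int) : Prop := number ≠ -1
instance (number : Int) : Decidable (Pre_get_prev number) := by unfold Pre_get_prev; infer_instance
def pvWitness_get_prev : Int := (6)
def Spec_get_prev (number : Int) (out : Int) : Prop := out = get_prev_alt number
instance (number : Int) (out : Int) : Decidable (Spec_get_prev number out) := by unfold Spec_get_prev; infer_instance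

-- ===== CLAIM (what is proved, stated in full; the proofs are below) =====
def Claim_equal_get_prev : Prop := ∀ (number : Int), Dom_get_prev number → Pre_get_prev number → Spec_get_prev number (get_prev number)

-- ===== LEMMAS AND PROOFS =====

theorem natAndLow {t u v : Nat} (a b : Nat) (hu : u < 2 ^ t) (hv : v < 2 ^ t) :
    (a * 2 ^ t + u) &&& (b * 2 ^ t + v) = (a &&& b) * 2 ^ t + (u &&& v) := by
  apply Nat.eq_of_testBit_eq
  intro i
  rw [mul_comm a, mul_comm b, mul_comm (a &&& b)]
  rw [Nat.testBit_and, Nat.testBit_two_pow_mul_add _ hu, Nat.testBit_two_pow_mul_add _ hv,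
      Nat.testBit_two_pow_mul_add _ (Nat.and_lt_two_pow u hv), Nat.testBit_and]
  split_ifs <;> simp [Nat.testBit_and]

theorem natOrLow {t u v : Nat} (a b : Nat) (hu : u < 2 ^ t) (hv : v < 2 ^ t) :
    (a * 2 ^ t + u) ||| (b * 2 ^ t + v) = (a ||| b) * 2 ^ t + (u ||| v) := by
  apply Nat.eq_of_testBit_eq
  intro i
  rw [mul_comm a, mul_comm b, mul_comm (a ||| b)]
  rw [Nat.testBit_or, Nat.testBit_two_pow_mul_add _ hu, Nat.testBit_two_pow_mul_add _ hv,
      Nat.testBit_two_pow_mul_add _ (Nat.or_lt_two_pow hu hv), Nat.testBit_or]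
  split_ifs <;> simp [Nat.testBit_or]

theorem natNotOr {t u v : Nat} (hu : u < 2 ^ t) (hv : v < 2 ^ t) :
    (2 ^ t - 1 - u) ||| (2 ^ t - 1 - v) = 2 ^ t - 1 - (u &&& v) := by
  have h1 : 2 ^ t - 1 - u = 2 ^ t - (u + 1) := by omega
  have h2 : 2 ^ t - 1 - v = 2 ^ t - (v + 1) := by omega
  have h3 : 2 ^ t - 1 - (u &&& v) = 2 ^ t - ((u &&& v) + 1) := by omega
  rw [h1, h2, h3]
  apply Nat.eq_of_testBit_eq
  intro i
  rw [Nat.testBit_or, Nat.testBit_two_pow_sub_succ hu, Nat.testBit_two_pow_sub_succ hv,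
      Nat.testBit_two_pow_sub_succ (Nat.and_lt_two_pow u hv), Nat.testBit_and]
  cases hti : decide (i < t) <;> cases hui : u.testBit i <;> cases hvi : v.testBit i <;> simp

theorem natNotAnd {t u v : Nat} (hu : u < 2 ^ t) (hv : v < 2 ^ t) :
    (2 ^ t - 1 - u) &&& (2 ^ t - 1 - v) = 2 ^ t - 1 - (u ||| v) := by
  have h1 : 2 ^ t - 1 - u = 2 ^ t - (u + 1) := by omega
  have h2 : 2 ^ t - 1 - v = 2 ^ t - (v + 1) := by omega
  have h3 : 2 ^ t - 1 - (u ||| v) = 2 ^ t - ((u ||| v) + 1) := by omega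
  rw [h1, h2, h3]
  apply Nat.eq_of_testBit_eq
  intro i
  rw [Nat.testBit_and, Nat.testBit_two_pow_sub_succ hu, Nat.testBit_two_pow_sub_succ hv,
      Nat.testBit_two_pow_sub_succ (Nat.or_lt_two_pow hu hv), Nat.testBit_or]
  cases hti : decide (i < t) <;> cases hui : u.testBit i <;> cases hvi : v.testBit i <;> simp

-- halving lemma
theorem natHalfAnd (a b i j : Nat) (hi : i < 2) (hj : j < 2) :
    (2 * a + i) &&& (2 * b + j) = 2 * (a &&& b) + (i &&& j) := by
  have := natAndLow (t := 1) a b hi hj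
  simpa [pow_one, mul_comm] using this

theorem natHalfOr (a b i j : Nat) (hi : i < 2) (hj : j < 2) :
    (2 * a + i) ||| (2 * b + j) = 2 * (a ||| b) + (i ||| j) := by
  have := natOrLow (t := 1) a b hi hj
  simpa [pow_one, mul_comm] using this

theorem disjAdd : ∀ (x y : Nat), x &&& y = 0 → x + y = x ||| y := by
  intro x
  induction x using Nat.strong_induction_on with
  | _ x ih =>
    intro y hxy
    rcases Nat.eq_zero_or_pos x with rfl | hx
    · simp
    · have hx2 : x / 2 < x := Nat.div_lt_self hx (by norm_num)
      have hdx : x = 2 * (x / 2) + x % 2 := by omega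
      have hdy : y = 2 * (y / 2) + y % 2 := by omega
      have hA : x &&& y = 2 * (x / 2 &&& y / 2) + (x % 2 &&& y % 2) := by
        conv_lhs => rw [hdx, hdy]
        exact natHalfAnd _ _ _ _ (Nat.mod_lt _ (by norm_num)) (Nat.mod_lt _ (by norm_num))
      have h1 : x / 2 &&& y / 2 = 0 := by omega
      have h2 : x % 2 &&& y % 2 = 0 := by omega
      have hO : x ||| y = 2 * (x / 2 ||| y / 2) + (x % 2 ||| y % 2) := by
        conv_lhs => rw [hdx, hdy]
        exact natHalfOr _ _ _ _ (Nat.mod_lt _ (by norm_num)) (Nat.mod_lt _ (by norm_num))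
      have ihh := ih (x / 2) hx2 (y / 2) h1
      have hmod : x % 2 + y % 2 = x % 2 ||| y % 2 := by
        rcases Nat.mod_two_eq_zero_or_one x with h | h <;> rcases Nat.mod_two_eq_zero_or_one y with h' | h' <;>
          simp [h, h'] at h2 ⊢
      omega

theorem natSplitAdd {t u v : Nat} (hu : u < 2 ^ t) (hv : v < 2 ^ t) :
    (u &&& (2 ^ t - 1 - v)) + (u &&& v) = u := by
  have h2 : 2 ^ t - 1 - v = 2 ^ t - (v + 1) := by omega
  have hdisj : (u &&& (2 ^ t - 1 - v)) &&& (u &&& v) = 0 := by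
    apply Nat.eq_of_testBit_eq
    intro i
    rw [Nat.testBit_and, Nat.testBit_and, Nat.testBit_and, h2, Nat.testBit_two_pow_sub_succ hv]
    cases hvi : v.testBit i <;> simp [Nat.zero_testBit]
  have hor : (u &&& (2 ^ t - 1 - v)) ||| (u &&& v) = u := by
    apply Nat.eq_of_testBit_eq
    intro i
    rw [Nat.testBit_or, Nat.testBit_and, Nat.testBit_and, h2, Nat.testBit_two_pow_sub_succ hv]
    by_cases hit : i < t
    · cases hvi : v.testBit i <;> simp [hit]
    · have : u.testBit i = false := Nat.testBit_lt_two_pow (lt_of_lt_of_le hu (Nat.pow_le_pow_right (by norm_num) (by omega)))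
      simp [this]
  rw [disjAdd _ _ hdisj, hor]

theorem band_pos_neg {a b : Int} (ha : 0 ≤ a) (hb : b < 0) :
    PySem.Int.band a b = a - PySem.Int.band a (-b - 1) := by
  have hb' : (0:Int) ≤ -b - 1 := by omega
  rw [PySem.Int.band_of_nonneg ha hb']
  simp only [PySem.Int.band]
  rw [if_pos ha, if_neg (by omega : ¬ (0:Int) ≤ b)]
  have h1 : a.toNat &&& (-b-1).toNat ≤ a.toNat := Nat.and_le_left
  omega

theorem band_neg_neg {a b : Int} (ha : a < 0) (hb : b < 0) :
    PySem.Int.band a b = -(PySem.Int.bor (-a - 1) (-b - 1)) - 1 := by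
  rw [PySem.Int.bor_of_nonneg (by omega) (by omega)]
  simp only [PySem.Int.band]
  rw [if_neg (by omega : ¬ (0:Int) ≤ a), if_neg (by omega : ¬ (0:Int) ≤ b)]

theorem bor_pos_neg {a b : Int} (ha : 0 ≤ a) (hb : b < 0) :
    PySem.Int.bor a b = -((-b - 1) - PySem.Int.band (-b - 1) a) - 1 := by
  have hb' : (0:Int) ≤ -b - 1 := by omega
  rw [PySem.Int.band_of_nonneg hb' ha]
  simp only [PySem.Int.bor]
  rw [if_pos ha, if_neg (by omega : ¬ (0:Int) ≤ b)]
  have h1 : (-b-1).toNat &&& a.toNat ≤ (-b-1).toNat := Nat.and_le_left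
  omega

theorem bor_neg_neg {a b : Int} (ha : a < 0) (hb : b < 0) :
    PySem.Int.bor a b = -(PySem.Int.band (-a - 1) (-b - 1)) - 1 := by
  rw [PySem.Int.band_of_nonneg (by omega) (by omega)]
  simp only [PySem.Int.bor]
  rw [if_neg (by omega : ¬ (0:Int) ≤ a), if_neg (by omega : ¬ (0:Int) ≤ b)]

theorem band_not_self (a : Int) : PySem.Int.band a (-a - 1) = 0 := by
  by_cases ha : 0 ≤ a
  case neg => replace ha : a < 0 := by omega
              rw [PySem.Int.band_comm, band_pos_neg (by omega : (0:Int) ≤ -a - 1) ha,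
                  PySem.Int.band_self]
              ring
  case pos =>
    rw [band_pos_neg ha (by omega), show -(-a - 1) - 1 = a from by ring, PySem.Int.band_self]
    ring
theorem castSub {t v : Nat} (hv : v < 2 ^ t) : ((2 ^ t - 1 - v : Nat) : Int) = 2 ^ t - 1 - (v : Int) := by
  have h1 : v ≤ 2 ^ t - 1 := by omega
  rw [Nat.cast_sub h1, Nat.cast_sub (by omega : (1:Nat) ≤ 2 ^ t)]
  push_cast
  ring

theorem intK_pos_pos (m n : Nat) (t u v : Nat) (hu : u < 2 ^ t) (hv : v < 2 ^ t) :
    PySem.Int.band ((m : Int) * 2 ^ t + (u : Int)) ((n : Int) * 2 ^ t + (v : Int))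
      = PySem.Int.band (m : Int) (n : Int) * 2 ^ t + ((u &&& v : Nat) : Int) := by
  have h1 : ((m : Int) * 2 ^ t + (u : Int)) = ((m * 2 ^ t + u : Nat) : Int) := by push_cast; ring
  have h2 : ((n : Int) * 2 ^ t + (v : Int)) = ((n * 2 ^ t + v : Nat) : Int) := by push_cast; ring
  rw [h1, h2, PySem.Int.band_natCast, PySem.Int.band_natCast, natAndLow _ _ hu hv]
  push_cast
  ring

theorem intK_pos_neg (m n : Nat) (t u v : Nat) (hu : u < 2 ^ t) (hv : v < 2 ^ t) :
    PySem.Int.band ((m : Int) * 2 ^ t + (u : Int)) ((-(n:Int) - 1) * 2 ^ t + (v : Int))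
      = PySem.Int.band (m : Int) (-(n:Int) - 1) * 2 ^ t + ((u &&& v : Nat) : Int) := by
  have h2t : (0:Int) < 2 ^ t := by positivity
  have hvi : (v : Int) < 2 ^ t := by exact_mod_cast hv
  have hA : (0:Int) ≤ (m : Int) * 2 ^ t + (u : Int) := by positivity
  have hB : ((-(n:Int) - 1) * 2 ^ t + (v : Int)) < 0 := by
    have hn : (0:Int) ≤ (n:Int) * 2 ^ t := by positivity
    nlinarith
  rw [band_pos_neg hA hB, band_pos_neg (by positivity) (by nlinarith : (-(n:Int) - 1) < 0)]
  have hy1 : -(-(n:Int) - 1) - 1 = (n : Int) := by ring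
  rw [hy1]
  have hB1 : -((-(n:Int) - 1) * 2 ^ t + (v : Int)) - 1 = ((n * 2 ^ t + (2 ^ t - 1 - v) : Nat) : Int) := by
    push_cast [castSub hv]; ring
  have hA1 : (m : Int) * 2 ^ t + (u : Int) = ((m * 2 ^ t + u : Nat) : Int) := by push_cast; ring
  rw [hA1, hB1, PySem.Int.band_natCast, PySem.Int.band_natCast,
      natAndLow _ _ hu (by omega : 2 ^ t - 1 - v < 2 ^ t)]
  have hs := natSplitAdd hu hv
  have hsi := congrArg (Nat.cast : Nat → Int) hs
  push_cast at hsi ⊢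
  linear_combination -hsi

theorem intK_neg_neg (m n : Nat) (t u v : Nat) (hu : u < 2 ^ t) (hv : v < 2 ^ t) :
    PySem.Int.band ((-(m:Int) - 1) * 2 ^ t + (u : Int)) ((-(n:Int) - 1) * 2 ^ t + (v : Int))
      = PySem.Int.band (-(m:Int) - 1) (-(n:Int) - 1) * 2 ^ t + ((u &&& v : Nat) : Int) := by
  have h2t : (0:Int) < 2 ^ t := by positivity
  have hui : (u : Int) < 2 ^ t := by exact_mod_cast hu
  have hvi : (v : Int) < 2 ^ t := by exact_mod_cast hv
  have hA : ((-(m:Int) - 1) * 2 ^ t + (u : Int)) < 0 := by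
    have hm : (0:Int) ≤ (m:Int) * 2 ^ t := by positivity
    nlinarith
  have hB : ((-(n:Int) - 1) * 2 ^ t + (v : Int)) < 0 := by
    have hn : (0:Int) ≤ (n:Int) * 2 ^ t := by positivity
    nlinarith
  rw [band_neg_neg hA hB, band_neg_neg (by nlinarith : (-(m:Int) - 1) < 0) (by nlinarith : (-(n:Int) - 1) < 0)]
  have hA1 : -((-(m:Int) - 1) * 2 ^ t + (u : Int)) - 1 = ((m * 2 ^ t + (2 ^ t - 1 - u) : Nat) : Int) := by
    push_cast [castSub hu]; ring
  have hB1 : -((-(n:Int) - 1) * 2 ^ t + (v : Int)) - 1 = ((n * 2 ^ t + (2 ^ t - 1 - v) : Nat) : Int) := by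
    push_cast [castSub hv]; ring
  have hm1 : -(-(m:Int) - 1) - 1 = (m : Int) := by ring
  have hn1 : -(-(n:Int) - 1) - 1 = (n : Int) := by ring
  rw [hA1, hB1, hm1, hn1, PySem.Int.bor_natCast, PySem.Int.bor_natCast,
      natOrLow _ _ (by omega : 2 ^ t - 1 - u < 2 ^ t) (by omega : 2 ^ t - 1 - v < 2 ^ t),
      natNotOr hu hv]
  have hand : u &&& v < 2 ^ t := Nat.and_lt_two_pow u hv
  push_cast [castSub hand]
  ring

theorem intK (x y : Int) (t u v : Nat) (hu : u < 2 ^ t) (hv : v < 2 ^ t) :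
    PySem.Int.band (x * 2 ^ t + (u : Int)) (y * 2 ^ t + (v : Int))
      = PySem.Int.band x y * 2 ^ t + ((u &&& v : Nat) : Int) := by
  by_cases hx : 0 ≤ x <;> by_cases hy : 0 ≤ y
  · obtain ⟨m, rfl⟩ := Int.eq_ofNat_of_zero_le hx
    obtain ⟨n, rfl⟩ := Int.eq_ofNat_of_zero_le hy
    exact intK_pos_pos m n t u v hu hv
  · obtain ⟨m, rfl⟩ := Int.eq_ofNat_of_zero_le hx
    obtain ⟨n, hn⟩ := Int.eq_ofNat_of_zero_le (by omega : (0:Int) ≤ -y - 1)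
    have hy' : y = -(n:Int) - 1 := by omega
    subst hy'
    exact intK_pos_neg m n t u v hu hv
  · obtain ⟨n, rfl⟩ := Int.eq_ofNat_of_zero_le hy
    obtain ⟨m, hm⟩ := Int.eq_ofNat_of_zero_le (by omega : (0:Int) ≤ -x - 1)
    have hx' : x = -(m:Int) - 1 := by omega
    subst hx'
    rw [PySem.Int.band_comm, PySem.Int.band_comm (-(m:Int) - 1), Nat.and_comm]
    exact intK_pos_neg n m t v u hv hu
  · obtain ⟨m, hm⟩ := Int.eq_ofNat_of_zero_le (by omega : (0:Int) ≤ -x - 1)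
    obtain ⟨n, hn⟩ := Int.eq_ofNat_of_zero_le (by omega : (0:Int) ≤ -y - 1)
    have hx' : x = -(m:Int) - 1 := by omega
    have hy' : y = -(n:Int) - 1 := by omega
    subst hx'; subst hy'
    exact intK_neg_neg m n t u v hu hv

theorem intL_pos_pos (m n : Nat) (t u v : Nat) (hu : u < 2 ^ t) (hv : v < 2 ^ t) :
    PySem.Int.bor ((m : Int) * 2 ^ t + (u : Int)) ((n : Int) * 2 ^ t + (v : Int))
      = PySem.Int.bor (m : Int) (n : Int) * 2 ^ t + ((u ||| v : Nat) : Int) := by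
  have h1 : ((m : Int) * 2 ^ t + (u : Int)) = ((m * 2 ^ t + u : Nat) : Int) := by push_cast; ring
  have h2 : ((n : Int) * 2 ^ t + (v : Int)) = ((n * 2 ^ t + v : Nat) : Int) := by push_cast; ring
  rw [h1, h2, PySem.Int.bor_natCast, PySem.Int.bor_natCast, natOrLow _ _ hu hv]
  push_cast
  ring

theorem intL_pos_neg (m n : Nat) (t u v : Nat) (hu : u < 2 ^ t) (hv : v < 2 ^ t) :
    PySem.Int.bor ((m : Int) * 2 ^ t + (u : Int)) ((-(n:Int) - 1) * 2 ^ t + (v : Int))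
      = PySem.Int.bor (m : Int) (-(n:Int) - 1) * 2 ^ t + ((u ||| v : Nat) : Int) := by
  have h2t : (0:Int) < 2 ^ t := by positivity
  have hvi : (v : Int) < 2 ^ t := by exact_mod_cast hv
  have hA : (0:Int) ≤ (m : Int) * 2 ^ t + (u : Int) := by positivity
  have hB : ((-(n:Int) - 1) * 2 ^ t + (v : Int)) < 0 := by
    have hn : (0:Int) ≤ (n:Int) * 2 ^ t := by positivity
    nlinarith
  rw [bor_pos_neg hA hB, bor_pos_neg (by positivity) (by nlinarith : (-(n:Int) - 1) < 0)]
  have hy1 : -(-(n:Int) - 1) - 1 = (n : Int) := by ring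
  rw [hy1]
  have hB1 : -((-(n:Int) - 1) * 2 ^ t + (v : Int)) - 1 = ((n * 2 ^ t + (2 ^ t - 1 - v) : Nat) : Int) := by
    push_cast [castSub hv]; ring
  have hA1 : (m : Int) * 2 ^ t + (u : Int) = ((m * 2 ^ t + u : Nat) : Int) := by push_cast; ring
  rw [hA1, hB1, PySem.Int.band_natCast, PySem.Int.band_natCast,
      natAndLow _ _ (by omega : 2 ^ t - 1 - v < 2 ^ t) hu]
  -- (2^t-1-v) &&& u, related to u ||| v by natSplitAdd and natNotAnd
  have hor : u ||| v < 2 ^ t := Nat.or_lt_two_pow hu hv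
  have hs := natSplitAdd (u := 2 ^ t - 1 - v) (v := u) (by omega) hu
  have hdm := natNotAnd hv hu
  rw [Nat.or_comm] at hdm
  rw [hdm] at hs
  -- hs : ((2^t-1-v) &&& (2^t-1-u)) + ((2^t-1-v) &&& u) = 2^t-1-v  with first term = 2^t-1-(u|||v)
  have hsi := congrArg (Nat.cast : Nat → Int) hs
  push_cast [castSub hv, castSub hor] at hsi
  push_cast [castSub hv]
  linear_combination hsi

theorem intL_neg_neg (m n : Nat) (t u v : Nat) (hu : u < 2 ^ t) (hv : v < 2 ^ t) :
    PySem.Int.bor ((-(m:Int) - 1) * 2 ^ t + (u : Int)) ((-(n:Int) - 1) * 2 ^ t + (v : Int))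
      = PySem.Int.bor (-(m:Int) - 1) (-(n:Int) - 1) * 2 ^ t + ((u ||| v : Nat) : Int) := by
  have h2t : (0:Int) < 2 ^ t := by positivity
  have hui : (u : Int) < 2 ^ t := by exact_mod_cast hu
  have hvi : (v : Int) < 2 ^ t := by exact_mod_cast hv
  have hA : ((-(m:Int) - 1) * 2 ^ t + (u : Int)) < 0 := by
    have hm : (0:Int) ≤ (m:Int) * 2 ^ t := by positivity
    nlinarith
  have hB : ((-(n:Int) - 1) * 2 ^ t + (v : Int)) < 0 := by
    have hn : (0:Int) ≤ (n:Int) * 2 ^ t := by positivity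
    nlinarith
  rw [bor_neg_neg hA hB, bor_neg_neg (by nlinarith : (-(m:Int) - 1) < 0) (by nlinarith : (-(n:Int) - 1) < 0)]
  have hA1 : -((-(m:Int) - 1) * 2 ^ t + (u : Int)) - 1 = ((m * 2 ^ t + (2 ^ t - 1 - u) : Nat) : Int) := by
    push_cast [castSub hu]; ring
  have hB1 : -((-(n:Int) - 1) * 2 ^ t + (v : Int)) - 1 = ((n * 2 ^ t + (2 ^ t - 1 - v) : Nat) : Int) := by
    push_cast [castSub hv]; ring
  have hm1 : -(-(m:Int) - 1) - 1 = (m : Int) := by ring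
  have hn1 : -(-(n:Int) - 1) - 1 = (n : Int) := by ring
  rw [hA1, hB1, hm1, hn1, PySem.Int.band_natCast, PySem.Int.band_natCast,
      natAndLow _ _ (by omega : 2 ^ t - 1 - u < 2 ^ t) (by omega : 2 ^ t - 1 - v < 2 ^ t),
      natNotAnd hu hv]
  have hor : u ||| v < 2 ^ t := Nat.or_lt_two_pow hu hv
  push_cast [castSub hor]
  ring

theorem intL (x y : Int) (t u v : Nat) (hu : u < 2 ^ t) (hv : v < 2 ^ t) :
    PySem.Int.bor (x * 2 ^ t + (u : Int)) (y * 2 ^ t + (v : Int))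
      = PySem.Int.bor x y * 2 ^ t + ((u ||| v : Nat) : Int) := by
  by_cases hx : 0 ≤ x <;> by_cases hy : 0 ≤ y
  · obtain ⟨m, rfl⟩ := Int.eq_ofNat_of_zero_le hx
    obtain ⟨n, rfl⟩ := Int.eq_ofNat_of_zero_le hy
    exact intL_pos_pos m n t u v hu hv
  · obtain ⟨m, rfl⟩ := Int.eq_ofNat_of_zero_le hx
    obtain ⟨n, hn⟩ := Int.eq_ofNat_of_zero_le (by omega : (0:Int) ≤ -y - 1)
    have hy' : y = -(n:Int) - 1 := by omega
    subst hy'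
    exact intL_pos_neg m n t u v hu hv
  · obtain ⟨n, rfl⟩ := Int.eq_ofNat_of_zero_le hy
    obtain ⟨m, hm⟩ := Int.eq_ofNat_of_zero_le (by omega : (0:Int) ≤ -x - 1)
    have hx' : x = -(m:Int) - 1 := by omega
    subst hx'
    rw [PySem.Int.bor_comm, PySem.Int.bor_comm (-(m:Int) - 1), Nat.or_comm]
    exact intL_pos_neg n m t v u hv hu
  · obtain ⟨m, hm⟩ := Int.eq_ofNat_of_zero_le (by omega : (0:Int) ≤ -x - 1)
    obtain ⟨n, hn⟩ := Int.eq_ofNat_of_zero_le (by omega : (0:Int) ≤ -y - 1)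
    have hx' : x = -(m:Int) - 1 := by omega
    have hy' : y = -(n:Int) - 1 := by omega
    subst hx'; subst hy'
    exact intL_neg_neg m n t u v hu hv
theorem band1_eq (c : Int) : PySem.Int.band c 1 = c % 2 := by
  rw [PySem.Int.band_one]; simp [pysem]

theorem shr1_eq (c : Int) : c >>> (1:Nat) = c / 2 := by
  rw [Int.shiftRight_eq_div_pow]; norm_num

theorem loop1_spec (c1 : Nat) : ∀ (fuel : Nat) (x : Int) (acc : Nat), c1 ≤ fuel → x % 2 = 0 →
    getPrevLoop1 fuel (x * 2 ^ c1 + 2 ^ c1 - 1) acc = (x, acc + c1) := by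
  induction c1 with
  | zero =>
    intro fuel x acc _ hx
    have h0 : x * 2 ^ 0 + 2 ^ 0 - 1 = x := by ring
    rw [h0]
    cases fuel with
    | zero => rfl
    | succ f => simp [getPrevLoop1, band1_eq, hx]
  | succ c1 ih =>
    intro fuel x acc hf hx
    cases fuel with
    | zero => omega
    | succ f =>
      have hy : x * 2 ^ (c1+1) + 2 ^ (c1+1) - 1 = 2 * (x * 2 ^ c1 + 2 ^ c1) - 1 := by ring
      rw [hy]
      set y : Int := x * 2 ^ c1 + 2 ^ c1 with hydef
      have hodd : (2 * y - 1) % 2 = 1 := by omega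
      have hdiv : (2 * y - 1) / 2 = y - 1 := by omega
      simp only [getPrevLoop1, band1_eq, hodd, shr1_eq]
      rw [hdiv]
      have hthis : y - 1 = x * 2 ^ c1 + 2 ^ c1 - 1 := by rw [hydef]
      rw [hthis, ih f x (acc+1) (by omega) hx, show acc + 1 + c1 = acc + (c1 + 1) from by omega]
      simp

theorem loop2_spec (c0 : Nat) : ∀ (fuel : Nat) (y : Int) (acc : Nat), c0 ≤ fuel → y % 2 = 1 →
    getPrevLoop2 fuel (y * 2 ^ c0) acc = (y, acc + c0) := by
  induction c0 with
  | zero =>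
    intro fuel y acc _ hy
    have h0 : y * 2 ^ 0 = y := by ring
    rw [h0]
    cases fuel with
    | zero => rfl
    | succ f =>
      simp only [getPrevLoop2, band1_eq]
      rw [if_neg (by omega)]
      simp
  | succ c0 ih =>
    intro fuel y acc hf hy
    cases fuel with
    | zero => omega
    | succ f =>
      have hz : y * 2 ^ (c0+1) = 2 * (y * 2 ^ c0) := by ring
      rw [hz]
      set z : Int := y * 2 ^ c0 with hzdef
      have hz0 : z ≠ 0 := by
        have : y ≠ 0 := by omega
        exact mul_ne_zero this (by positivity)
      have heven : (2 * z) % 2 = 0 := by omega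
      have hdiv : (2 * z) / 2 = z := by omega
      simp only [getPrevLoop2, band1_eq, shr1_eq]
      have hcond : (2 * z ≠ 0 ∧ (2 * z) % 2 = 0) := ⟨by omega, heven⟩
      rw [if_pos hcond, hdiv, ih f y (acc+1) (by omega) hy]
      congr 1
      omega

theorem decomp (n : Int) (hn : n ≠ -1) :
    (∃ c1 : Nat, n = 2 ^ c1 - 1) ∨
    (∃ (h : Int) (c0 c1 : Nat), 1 ≤ c0 ∧ n = (2 * h + 1) * 2 ^ (c0 + c1) + 2 ^ c1 - 1) := by
  have main : ∀ (N : Nat) (n : Int), n.natAbs ≤ N → n ≠ -1 →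
      (∃ c1 : Nat, n = 2 ^ c1 - 1) ∨
      (∃ (h : Int) (c0 c1 : Nat), 1 ≤ c0 ∧ n = (2 * h + 1) * 2 ^ (c0 + c1) + 2 ^ c1 - 1) := by
    intro N
    induction N with
    | zero =>
      intro n hN _
      left
      exact ⟨0, by omega⟩
    | succ N ih =>
      intro n hN hn
      rcases Int.even_or_odd n with ⟨m, hm⟩ | ⟨m, hm⟩
      · -- n = 2m
        rcases eq_or_ne n 0 with rfl | hne
        · left; exact ⟨0, by norm_num⟩
        · rcases Int.even_or_odd m with ⟨k, hk⟩ | ⟨k, hk⟩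
          · -- m even, m ≠ 0, m ≠ -1; recurse
            have hm0 : m ≠ 0 := by omega
            have hmN : m.natAbs ≤ N := by omega
            rcases ih m hmN (by omega) with ⟨c1, hc⟩ | ⟨h, c0, c1, hc0, hc⟩
            · -- m = 2^c1 - 1 and m even forces c1 = 0, m = 0, contradiction
              rcases Nat.eq_zero_or_pos c1 with rfl | hpos
              · simp at hc; omega
              · exfalso
                have h2 : (2:Int) ^ c1 = 2 * 2 ^ (c1 - 1) := by
                  rw [← pow_succ']
                  congr 1
                  omega
                omega
            · -- m = (2h+1) 2^(c0+c1) + 2^c1 - 1, even forces c1 = 0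
              rcases Nat.eq_zero_or_pos c1 with rfl | hpos
              · right
                refine ⟨h, c0 + 1, 0, by omega, ?_⟩
                rw [hm, hc]
                ring
              · exfalso
                obtain ⟨A, hA⟩ : (2:Int) ∣ 2 ^ (c0 + c1) := dvd_pow_self 2 (by omega)
                obtain ⟨B, hB⟩ : (2:Int) ∣ 2 ^ c1 := dvd_pow_self 2 (by omega)
                rw [hA, hB] at hc
                have e : m = 2 * ((2 * h + 1) * A + B) - 1 := by rw [hc]; ring
                omega
          · -- m odd: n = 2m = (2k+1) * 2^1
            right
            refine ⟨k, 1, 0, le_refl 1, ?_⟩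
            norm_num
            omega
      · -- n = 2m + 1, n ≠ -1 so m ≠ -1
        have hm1 : m ≠ -1 := by omega
        have hmN : m.natAbs ≤ N := by omega
        rcases ih m hmN hm1 with ⟨c1, hc⟩ | ⟨h, c0, c1, hc0, hc⟩
        · left
          refine ⟨c1 + 1, ?_⟩
          rw [hm, hc]
          ring
        · right
          refine ⟨h, c0, c1 + 1, hc0, ?_⟩
          rw [hm, hc]
          ring
  exact main n.natAbs n (le_refl _) hn

theorem not_eq (n : Int) : Int.not n = -n - 1 := by
  cases n <;> simp [Int.not] <;> omega

theorem and_pow_pred (c1 : Nat) : (2 ^ c1 - 1) &&& (2 ^ c1) = 0 := by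
  apply Nat.eq_of_testBit_eq
  intro i
  rw [Nat.testBit_and, Nat.testBit_two_pow_sub_one, Nat.testBit_two_pow]
  simp [Nat.zero_testBit]
  omega

theorem bound_a {c1 : Nat} {n : Int} (hn : n = 2 ^ c1 - 1) (hd : Dom_get_prev n) : c1 ≤ 32 := by
  simp only [Dom_get_prev, pvDomInt, decide_eq_true_eq] at hd
  by_contra hc
  have h33 : (8589934592 : Int) ≤ 2 ^ c1 := by
    calc (8589934592 : Int) = 2 ^ 33 := by norm_num
    _ ≤ 2 ^ c1 := pow_le_pow_right₀ (by norm_num) (by omega)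
  omega

theorem bound_b {h : Int} {c0 c1 : Nat} {n : Int} (hc0 : 1 ≤ c0)
    (hn : n = (2 * h + 1) * 2 ^ (c0 + c1) + 2 ^ c1 - 1) (hd : Dom_get_prev n) : c0 + c1 ≤ 32 := by
  simp only [Dom_get_prev, pvDomInt, decide_eq_true_eq] at hd
  by_contra hc
  have hsplit : (2 : Int) ^ (c0 + c1) = 2 * 2 ^ (c0 + c1 - 1) := by
    rw [← pow_succ']
    congr 1
    omega
  have h32 : (4294967296 : Int) ≤ 2 ^ (c0 + c1 - 1) := by
    calc (4294967296 : Int) = 2 ^ 32 := by norm_num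
    _ ≤ 2 ^ (c0 + c1 - 1) := pow_le_pow_right₀ (by norm_num) (by omega)
  have hc1 : (2 : Int) ^ c1 ≤ 2 ^ (c0 + c1 - 1) := pow_le_pow_right₀ (by norm_num) (by omega)
  have hpos : (0:Int) < 2 ^ c1 := by positivity
  by_cases hh : 0 ≤ h
  case pos =>
    have hmul : 1 * 2 ^ (c0 + c1) ≤ (2 * h + 1) * 2 ^ (c0 + c1) :=
      mul_le_mul_of_nonneg_right (by omega) (by positivity)
    omega
  case neg =>
    have hmul : (2 * h + 1) * 2 ^ (c0 + c1) ≤ (-1) * 2 ^ (c0 + c1) :=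
      mul_le_mul_of_nonneg_right (by omega) (by positivity)
    omega

theorem a_case_a {c1 : Nat} {n : Int} (hn : n = 2 ^ c1 - 1) (hc1 : c1 ≤ 32) : get_prev n = -1 := by
  have h1 : getPrevLoop1 64 n 0 = (0, 0 + c1) := by
    rw [hn, show (2:Int) ^ c1 - 1 = 0 * 2 ^ c1 + 2 ^ c1 - 1 from by ring]
    exact loop1_spec c1 64 0 0 (by omega) (by norm_num)
  simp [get_prev, h1]

theorem b_case_a {c1 : Nat} {n : Int} (hn : n = 2 ^ c1 - 1) : get_prev_alt n = -1 := by
  have hc : PySem.Int.band n (n + 1) = 0 := by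
    have hn1 : n + 1 = ((2 ^ c1 : Nat) : Int) := by rw [hn]; push_cast; ring
    have hcast : n = ((2 ^ c1 - 1 : Nat) : Int) := by
      rw [hn, Nat.cast_sub Nat.one_le_two_pow]
      push_cast
      ring
    rw [hn1, hcast, PySem.Int.band_natCast, and_pow_pred]
    norm_num
  simp [get_prev_alt, hc]

theorem a_case_b {h : Int} {c0 c1 : Nat} {n : Int} (hc0 : 1 ≤ c0) (hp : c0 + c1 ≤ 32)
    (hn : n = (2 * h + 1) * 2 ^ (c0 + c1) + 2 ^ c1 - 1) :
    get_prev n = (2 * h + 1) * 2 ^ (c0 + c1) - 2 ^ (c0 - 1) := by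
  have hc0split : (2:Int) ^ c0 = 2 * 2 ^ (c0 - 1) := by
    rw [← pow_succ']
    congr 1
    omega
  set x : Int := (2 * h + 1) * 2 ^ c0 with hxdef
  have hxeven : x % 2 = 0 := by
    have : x = 2 * ((2 * h + 1) * 2 ^ (c0 - 1)) := by rw [hxdef, hc0split]; ring
    omega
  have hx0 : x ≠ 0 := mul_ne_zero (by omega) (by positivity)
  have h1 : getPrevLoop1 64 n 0 = (x, 0 + c1) := by
    rw [hn, show (2 * h + 1) * 2 ^ (c0 + c1) + 2 ^ c1 - 1 = x * 2 ^ c1 + 2 ^ c1 - 1 from by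
          rw [hxdef, pow_add]; ring,
        loop1_spec c1 64 x 0 (by omega) hxeven]
  have h2 : getPrevLoop2 64 x 0 = (2 * h + 1, 0 + c0) := by
    rw [hxdef, loop2_spec c0 64 (2 * h + 1) 0 (by omega) (by omega)]
  simp only [get_prev, h1, h2]
  rw [if_neg hx0]
  simp only [Nat.zero_add]
  -- the AND that clears the low bits
  have hppos : (0:Nat) < 2 ^ (c0 + c1) := by positivity
  have hc1le : (2:Nat) ^ c1 ≤ 2 ^ (c0 + c1) := Nat.pow_le_pow_right (by norm_num) (by omega)
  have hps : (2:Nat) ^ (c0 + c1 + 1) = 2 * 2 ^ (c0 + c1) := by rw [pow_succ]; ring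
  set u : Nat := 2 ^ (c0 + c1) + 2 ^ c1 - 1 with hudef
  have hu : u < 2 ^ (c0 + c1 + 1) := by omega
  have hucast : (u : Int) = 2 ^ (c0 + c1) + 2 ^ c1 - 1 := by
    rw [hudef, Nat.cast_sub (le_trans Nat.one_le_two_pow (Nat.le_add_right _ _))]
    push_cast
    ring
  have hncast : n = h * 2 ^ (c0 + c1 + 1) + (u : Int) := by
    rw [hn, hucast, pow_succ]
    ring
  have hshift : ((Int.not 0) <<< (c0 + c1 + 1)) = (-1) * 2 ^ (c0 + c1 + 1) + ((0:Nat) : Int) := by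
    rw [show (Int.not 0) = (-1:Int) from by decide, Int.shiftLeft_eq]
    norm_num
  have hband : PySem.Int.band n ((Int.not 0) <<< (c0 + c1 + 1)) = h * 2 ^ (c0 + c1 + 1) := by
    rw [hncast, hshift, intK h (-1) (c0 + c1 + 1) u 0 hu (by positivity), PySem.Int.band_neg_one]
    simp
  rw [hband]
  -- the OR that installs the run of ones
  set mN : Nat := (2 ^ (c1 + 1) - 1) * 2 ^ (c0 - 1) with hmNdef
  have hmm : (2:Nat) ^ (c1 + 1) * 2 ^ (c0 - 1) = 2 ^ (c0 + c1) := by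
    rw [← pow_add]
    congr 1
    omega
  have hc01le : (2:Nat) ^ (c0 - 1) ≤ 2 ^ (c0 + c1) := Nat.pow_le_pow_right (by norm_num) (by omega)
  have hmNeq : mN = 2 ^ (c0 + c1) - 2 ^ (c0 - 1) := by
    rw [hmNdef, Nat.sub_mul, hmm]
    norm_num
  have hmNlt : mN < 2 ^ (c0 + c1 + 1) := by
    rw [hmNeq]
    exact lt_of_le_of_lt (Nat.sub_le _ _) (Nat.pow_lt_pow_right (by norm_num) (Nat.lt_succ_self _))
  have hmask : ((1:Int) <<< (c1 + 1) - 1) <<< (c0 - 1) = 0 * 2 ^ (c0 + c1 + 1) + (mN : Int) := by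
    rw [Int.shiftLeft_eq, Int.shiftLeft_eq, hmNdef, Nat.cast_mul,
        Nat.cast_sub Nat.one_le_two_pow]
    push_cast
    ring
  have hh1 : h * 2 ^ (c0 + c1 + 1) = h * 2 ^ (c0 + c1 + 1) + ((0:Nat) : Int) := by norm_num
  rw [hmask, hh1, intL h 0 (c0 + c1 + 1) 0 mN (by positivity) hmNlt, PySem.Int.bor_zero]
  have hmNcast : (mN : Int) = 2 ^ (c0 + c1) - 2 ^ (c0 - 1) := by
    rw [hmNeq, Nat.cast_sub hc01le]
    push_cast
    ring
  rw [show ((0 ||| mN : Nat) : Int) = (mN : Int) from by simp, hmNcast, pow_succ]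
  ring

theorem b_case_b {h : Int} {c0 c1 : Nat} {n : Int} (hc0 : 1 ≤ c0)
    (hn : n = (2 * h + 1) * 2 ^ (c0 + c1) + 2 ^ c1 - 1) :
    get_prev_alt n = (2 * h + 1) * 2 ^ (c0 + c1) - 2 ^ (c0 - 1) := by
  set X : Int := (2 * h + 1) * 2 ^ (c0 - 1) with hXdef
  have hXpow : X * 2 ^ (c1 + 1) = (2 * h + 1) * 2 ^ (c0 + c1) := by
    rw [hXdef, mul_assoc, ← pow_add, show c0 - 1 + (c1 + 1) = c0 + c1 from by omega]
  have hc1lt : (2:Nat) ^ c1 < 2 ^ (c1 + 1) := by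
    have : (2:Nat) ^ (c1 + 1) = 2 * 2 ^ c1 := by rw [pow_succ]; ring
    have : (0:Nat) < 2 ^ c1 := by positivity
    omega
  have hc1lt' : (2:Nat) ^ c1 - 1 < 2 ^ (c1 + 1) := by omega
  have hcastm : ((2 ^ c1 - 1 : Nat) : Int) = 2 ^ c1 - 1 := by
    rw [Nat.cast_sub Nat.one_le_two_pow]
    push_cast
    ring
  have hncast : n = X * 2 ^ (c1 + 1) + ((2 ^ c1 - 1 : Nat) : Int) := by
    rw [hn, hXpow, hcastm]
    ring
  have hn1cast : n + 1 = X * 2 ^ (c1 + 1) + ((2 ^ c1 : Nat) : Int) := by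
    rw [hn, hXpow]
    push_cast
    ring
  -- c = n & (n+1) clears the trailing ones
  have hc : PySem.Int.band n (n + 1) = (2 * h + 1) * 2 ^ (c0 + c1) := by
    rw [hn1cast, hncast, intK X X (c1 + 1) _ _ hc1lt' hc1lt, PySem.Int.band_self,
        and_pow_pred, hXpow]
    norm_num
  have hC0 : (2 * h + 1) * 2 ^ (c0 + c1) ≠ 0 := mul_ne_zero (by omega) (by positivity)
  simp only [get_prev_alt, hc]
  rw [if_neg hC0]
  have hppow : (2:Int) ^ (c0 + c1 + 1) = 2 ^ (c0 + c1) * 2 := by rw [pow_succ]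
  have hpp : (2:Nat) ^ (c0 + c1) < 2 ^ (c0 + c1 + 1) := by
    have : (2:Nat) ^ (c0 + c1 + 1) = 2 * 2 ^ (c0 + c1) := by rw [pow_succ]; ring
    have : (0:Nat) < 2 ^ (c0 + c1) := by positivity
    omega
  have hCcast : (2 * h + 1) * 2 ^ (c0 + c1) = h * 2 ^ (c0 + c1 + 1) + ((2 ^ (c0 + c1) : Nat) : Int) := by
    push_cast
    rw [hppow]
    ring
  have hCneg : -((2 * h + 1) * 2 ^ (c0 + c1)) = (-h - 1) * 2 ^ (c0 + c1 + 1) + ((2 ^ (c0 + c1) : Nat) : Int) := by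
    push_cast
    rw [hppow]
    ring
  -- low = c & -c is the lowest set bit 2^p
  have hlow : PySem.Int.band ((2 * h + 1) * 2 ^ (c0 + c1)) (-((2 * h + 1) * 2 ^ (c0 + c1)))
      = ((2 ^ (c0 + c1) : Nat) : Int) := by
    rw [hCneg, hCcast, intK h (-h - 1) (c0 + c1 + 1) _ _ hpp hpp, band_not_self]
    simp
  -- z = ~n & (n+1) is the lowest zero bit 2^c1
  have hnotcast : Int.not n = (-X - 1) * 2 ^ (c1 + 1) + ((2 ^ c1 : Nat) : Int) := by
    rw [not_eq, hn, ← hXpow]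
    push_cast
    rw [show (2:Int) ^ (c1 + 1) = 2 ^ c1 * 2 from by rw [pow_succ]]
    ring
  have hz : PySem.Int.band (Int.not n) (n + 1) = ((2 ^ c1 : Nat) : Int) := by
    rw [hnotcast, hn1cast, show (-X - 1 : Int) = -X - 1 from rfl,
        intK (-X - 1) X (c1 + 1) _ _ hc1lt hc1lt, PySem.Int.band_comm (-X - 1) X,
        band_not_self]
    simp
  rw [hlow, hz]
  -- the exact division low // (2*z) = 2^(c0-1)
  have hdiv : PySem.Int.floordiv ((2 ^ (c0 + c1) : Nat) : Int) (2 * ((2 ^ c1 : Nat) : Int))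
      = 2 ^ (c0 - 1) := by
    have h2z : 2 * ((2 ^ c1 : Nat) : Int) = 2 ^ (c1 + 1) := by
      push_cast
      rw [pow_succ]
      ring
    have hnum : ((2 ^ (c0 + c1) : Nat) : Int) = 2 ^ (c0 - 1) * 2 ^ (c1 + 1) := by
      push_cast
      rw [← pow_add, show c0 - 1 + (c1 + 1) = c0 + c1 from by omega]
    rw [h2z, hnum, PySem.Int.floordiv_eq_ediv_of_pos (by positivity),
        Int.mul_ediv_cancel _ (by positivity)]
  rw [hdiv]

-- ===== VERDICT (by name: the statement is the Claim_ definition above) =====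
theorem get_prev_spec : Claim_equal_get_prev := by
  intro n hd hp
  unfold Spec_get_prev
  rcases decomp n hp with ⟨c1, hn⟩ | ⟨h, c0, c1, hc0, hn⟩
  · rw [a_case_a hn (bound_a hn hd), b_case_a hn]
  · rw [a_case_b hc0 (bound_b hc0 hn hd) hn, b_case_b hc0 hn]
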